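-- pv_equiv track=rewrite | github.com/TSiyabi/aiops-The-Alphabet-Alchemist | main.py | string_to_number_list
-- ===== SOURCE A (Python) =====
-- def string_to_number_list(s: str) -> list[int]:
--     """
--     Processes a string according to the defined rules and returns a list of numbers.
--     Any character not in 'a'...'z' is treated as having a value of 0.
--     """
--     s = s.lower() # Convert input string to lowercase
--
--     def get_char_value(char: str) -> int:
--         """Helper function to get the value of a character."""
--         if 'a' <= char <= 'z':
--             return ord(char) - ord('a') + 1
--         return 0
--
--     result = []
--     i = 0
--     while i < len(s):
--         # If a character's value is 0, it's a standalone sequence resulting in 0.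
--         if get_char_value(s[i]) == 0:
--             result.append(0)
--             i += 1
--             continue
--
--         # 1. Determine the count using the chained 'z' rule for counts
--         count = 0
--         while i < len(s) and s[i] == 'z':
--             count += 26
--             i += 1
--
--         if i < len(s):
--             count += get_char_value(s[i])
--             i += 1
--
--         # 2. Collect and sum characters based on the item rule
--         sub_chars = []
--         items_collected = 0
--
--         while items_collected < count and i < len(s):
--             # Check if the item is a z-chain
--             if s[i] == 'z':
--                 # This is a z-chain item. Collect all z's and the char after.
--                 item_start_index = i
--                 while i < len(s) and s[i] == 'z':
--                     i += 1
--                 if i < len(s): # Include the character that terminates the z-chain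
--                     i += 1
--                 sub_chars.extend(list(s[item_start_index:i]))
--             else:
--                 # This is a single character item.
--                 sub_chars.append(s[i])
--                 i += 1
--
--             items_collected += 1
--
--         # 3. Sum and store the result
--         current_sum = sum(get_char_value(c) for c in sub_chars)
--         result.append(current_sum)
--
--     return result
-- ===== SOURCE B (Python) =====
-- def string_to_number_list(s: str) -> list[int]:
--     s = s.lower()
--
--     def val(c: str) -> int:
--         return ord(c) - 96 if 'a' <= c <= 'z' else 0
--
--     # Pass 1: tokenize into values. A 'z' starts a token absorbing the maximal
--     # run of z's plus one terminator char (if any); any other char is its own token.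
--     tokens = []
--     n = len(s)
--     i = 0
--     while i < n:
--         if s[i] == 'z':
--             v = 0
--             while i < n and s[i] == 'z':
--                 v += 26
--                 i += 1
--             if i < n:
--                 v += val(s[i])
--                 i += 1
--             tokens.append(v)
--         else:
--             tokens.append(val(s[i]))
--             i += 1
--     # Pass 2: one token is a count, then up to that many following tokens are summed.
--     result = []
--     m = len(tokens)
--     j = 0
--     while j < m:
--         count = tokens[j]
--         j += 1
--         take = min(count, m - j)
--         result.append(sum(tokens[j:j + take]))
--         j += take
--     return result
-- ===== Notes on version B (the rewrite author's own statement) =====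
-- stated objective: alternative
-- what changed: Replaces A's single index-juggling while-loop (which re-scans z-chains separately for counts and items and materialises sub-character lists to sum) by two passes: a tokenizer turning the string into a flat list of unit values once, then a cursor walk over the token list that reads a count token and sums the next min(count, remaining) tokens via one slice.
import Mathlib
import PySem

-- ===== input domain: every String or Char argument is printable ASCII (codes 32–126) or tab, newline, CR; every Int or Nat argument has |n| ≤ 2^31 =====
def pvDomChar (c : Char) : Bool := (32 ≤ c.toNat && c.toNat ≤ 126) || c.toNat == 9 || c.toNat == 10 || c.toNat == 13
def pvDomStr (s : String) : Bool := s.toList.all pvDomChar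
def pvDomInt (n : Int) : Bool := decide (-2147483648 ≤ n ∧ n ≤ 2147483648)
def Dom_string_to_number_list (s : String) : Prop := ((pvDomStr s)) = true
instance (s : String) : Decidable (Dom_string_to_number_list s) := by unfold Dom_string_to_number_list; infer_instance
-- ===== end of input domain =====

-- B replaces A's single index-juggling loop by two passes (tokenize into values, then walk
-- the token list): a different decomposition of the same exact behaviour (objective: alternative).

-- ===== PORT A =====

-- get_char_value
def pvVal (c : Char) : Int :=
  if 'a' ≤ c ∧ c ≤ 'z' then (c.toNat : Int) - ('a'.toNat : Int) + 1 else 0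

-- the inner "while i < len(s) and s[i] == 'z'" scan, appearing verbatim in both Pythons:
-- returns (number of leading 'z's, remaining suffix)
def pvZrun : List Char → Nat × List Char
  | [] => (0, [])
  | c :: rest => if c = 'z' then let p := pvZrun rest; (p.1 + 1, p.2) else (0, c :: rest)

theorem pvZrun_len : ∀ l : List Char, (pvZrun l).2.length ≤ l.length := by
  intro l; induction l with
  | nil => simp [pvZrun]
  | cons c rest ih =>
      simp only [pvZrun]
      split
      · simpa using Nat.le_succ_of_le ih
      · simp

-- A's step 1: "determine the count using the chained 'z' rule" — z-run then one more char
def pvHeader (l : List Char) : Int × List Char :=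
  match (pvZrun l).2 with
  | [] => (26 * ((pvZrun l).1 : Int), [])
  | t :: r => (26 * ((pvZrun l).1 : Int) + pvVal t, r)

theorem pvHeader_lt (c : Char) (rest : List Char) :
    (pvHeader (c :: rest)).2.length < (c :: rest).length := by
  by_cases hz : c = 'z'
  · have h1 : (pvZrun (c :: rest)).2.length ≤ rest.length := by
      simp only [pvZrun, if_pos hz]
      exact pvZrun_len rest
    rcases hp : (pvZrun (c :: rest)).2 with _ | ⟨t, r⟩
    · simp [pvHeader, hp]
    · rw [hp] at h1
      simp only [pvHeader, hp, List.length_cons] at h1 ⊢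
      omega
  · have h1 : pvZrun (c :: rest) = (0, c :: rest) := by simp [pvZrun, hz]
    simp [pvHeader, h1]

-- A's step 2: the item-collection loop (items_collected < count), gathering sub_chars
def pvCollect : Nat → List Char → List Char × List Char
  | 0, l => ([], l)
  | _ + 1, [] => ([], [])
  | k + 1, c :: rest =>
    if c = 'z' then
      -- z-chain item: all z's and the terminating char, if any
      match (pvZrun (c :: rest)).2 with
      | [] => (List.replicate (pvZrun (c :: rest)).1 'z', [])
      | t :: r2 =>
          let q := pvCollect k r2
          (List.replicate (pvZrun (c :: rest)).1 'z' ++ t :: q.1, q.2)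
    else
      let q := pvCollect k rest
      (c :: q.1, q.2)

theorem pvCollect_len : ∀ (k : Nat) (l : List Char), (pvCollect k l).2.length ≤ l.length := by
  intro k
  induction k with
  | zero => intro l; simp [pvCollect]
  | succ k ih =>
      intro l
      match l with
      | [] => simp [pvCollect]
      | c :: rest =>
          simp only [pvCollect]
          split
          · rename_i hz
            have hzl : (pvZrun (c :: rest)).2.length ≤ (c :: rest).length :=
              pvZrun_len (c :: rest)
            rcases hp : (pvZrun (c :: rest)).2 with _ | ⟨t, r2⟩
            · simp
            · rw [hp] at hzl
              have h2 := ih r2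
              simp only [List.length_cons] at hzl ⊢
              omega
          · have := ih rest
            simp only [List.length_cons]
            omega

-- A's main while loop over the remaining suffix of the (lowercased) string
def pvLoopA : List Char → List Int
  | [] => []
  | c :: rest =>
    if pvVal c = 0 then
      0 :: pvLoopA rest
    else
      let cr := pvHeader (c :: rest)       -- count (nonneg by construction; .toNat exact) + rest
      let q := pvCollect cr.1.toNat cr.2   -- sub_chars + rest
      ((q.1.map pvVal).sum) :: pvLoopA q.2 -- sum of get_char_value over sub_chars
  termination_by l => l.length
  decreasing_by
    · simp
    · have h1 := pvHeader_lt c rest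
      have h2 := pvCollect_len (pvHeader (c :: rest)).1.toNat (pvHeader (c :: rest)).2
      simp only [List.length_cons] at h1 ⊢
      omega

def string_to_number_list (s : String) : List Int :=
  pvLoopA (PySem.Str.lower s).toList

-- ===== PORT B =====

-- pass 1: token values ('z' absorbs the maximal z-run plus one terminator, if any)
def pvTokenize : List Char → List Int
  | [] => []
  | c :: rest =>
    if c = 'z' then
      match hp : (pvZrun (c :: rest)).2 with
      | [] => [26 * ((pvZrun (c :: rest)).1 : Int)]
      | t :: r2 => (26 * ((pvZrun (c :: rest)).1 : Int) + pvVal t) :: pvTokenize r2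
    else
      pvVal c :: pvTokenize rest
  termination_by l => l.length
  decreasing_by
    · have hzl := pvZrun_len (c :: rest)
      rw [hp] at hzl
      simp only [List.length_cons] at hzl ⊢
      omega
    · simp

-- pass 2: a count token, then the sum of up to `count` following tokens
def pvWalk : List Int → List Int
  | [] => []
  | c :: ts =>
    let tk := min c.toNat ts.length
    ((ts.take tk).sum) :: pvWalk (ts.drop tk)
  termination_by l => l.length
  decreasing_by
    simp only [List.length_drop, List.length_cons]
    omega

def string_to_number_list_alt (s : String) : List Int :=
  pvWalk (pvTokenize (PySem.Str.lower s).toList)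

-- ===== PRECONDITION & SPEC =====
def Spec_string_to_number_list (s : String) (out : List Int) : Prop := out = string_to_number_list_alt s
instance (s : String) (out : List Int) : Decidable (Spec_string_to_number_list s out) := by unfold Spec_string_to_number_list; infer_instance

-- ===== CLAIM (what is proved, stated in full; the proofs are below) =====
def Claim_equal_string_to_number_list : Prop := ∀ (s : String), Dom_string_to_number_list s → Spec_string_to_number_list s (string_to_number_list s)

-- ===== LEMMAS AND PROOFS =====

theorem pvVal_z : pvVal 'z' = 26 := by decide

-- pvCollect consumes exactly the first k tokens of the tokenization
theorem collect_tokens : ∀ (k : Nat) (l : List Char),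
    ((pvCollect k l).1.map pvVal).sum = ((pvTokenize l).take k).sum ∧
    pvTokenize (pvCollect k l).2 = (pvTokenize l).drop k := by
  intro k
  induction k with
  | zero => intro l; simp [pvCollect]
  | succ k ih =>
      intro l
      match l with
      | [] => simp [pvCollect, pvTokenize]
      | c :: rest =>
          by_cases hz : c = 'z'
          · simp only [pvCollect, pvTokenize, if_pos hz]
            rcases hp : (pvZrun (c :: rest)).2 with _ | ⟨t, r2⟩
            · simp [pvTokenize, pvVal_z]
              ring
            · obtain ⟨ihs, ihd⟩ := ih r2
              constructor
              · simp [List.sum_append, ihs, pvVal_z]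
                ring
              · simpa using ihd
          · simp only [pvCollect, pvTokenize, if_neg hz]
            obtain ⟨ihs, ihd⟩ := ih rest
            exact ⟨by simp [ihs], by simpa using ihd⟩

theorem take_min_len (k : Nat) (l : List Int) : l.take (min k l.length) = l.take k := by
  by_cases h : k ≤ l.length
  · rw [Nat.min_eq_left h]
  · rw [Nat.min_eq_right (by omega), List.take_length, List.take_of_length_le (by omega)]

theorem drop_min_len (k : Nat) (l : List Int) : l.drop (min k l.length) = l.drop k := by
  by_cases h : k ≤ l.length
  · rw [Nat.min_eq_left h]
  · rw [Nat.min_eq_right (by omega), List.drop_length, List.drop_of_length_le (by omega)]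

-- B's first token at a nonempty suffix is exactly A's header count, with the same remainder
theorem header_token (c : Char) (rest : List Char) :
    pvTokenize (c :: rest) =
      (pvHeader (c :: rest)).1 :: pvTokenize (pvHeader (c :: rest)).2 := by
  by_cases hz : c = 'z'
  · simp only [pvTokenize, pvHeader, if_pos hz]
    rcases hp : (pvZrun (c :: rest)).2 with _ | ⟨t, r2⟩ <;> simp [pvTokenize]
  · have h1 : pvZrun (c :: rest) = (0, c :: rest) := by simp [pvZrun, hz]
    simp [pvTokenize, pvHeader, if_neg hz, h1]

theorem loopA_eq_walk_tokenize_aux :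
    ∀ (n : Nat) (l : List Char), l.length ≤ n → pvLoopA l = pvWalk (pvTokenize l) := by
  intro n
  induction n with
  | zero =>
      intro l h
      have : l = [] := List.length_eq_zero_iff.mp (Nat.le_zero.mp h)
      subst this
      simp [pvLoopA, pvTokenize, pvWalk]
  | succ n ih =>
      intro l h
      match l with
      | [] => simp [pvLoopA, pvTokenize, pvWalk]
      | c :: rest =>
          by_cases h0 : pvVal c = 0
          · have hz : c ≠ 'z' := by
              intro hc; rw [hc, pvVal_z] at h0; exact absurd h0 (by norm_num)
            rw [show pvLoopA (c :: rest) = 0 :: pvLoopA rest by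
                  rw [pvLoopA]; simp [h0]]
            rw [show pvTokenize (c :: rest) = pvVal c :: pvTokenize rest by
                  rw [pvTokenize]; simp [hz]]
            rw [pvWalk]
            simp only [h0]
            have hrest : rest.length ≤ n := by simp at h; omega
            simp [ih rest hrest]
          · rw [show pvLoopA (c :: rest) =
                  (((pvCollect (pvHeader (c :: rest)).1.toNat (pvHeader (c :: rest)).2).1.map pvVal).sum) ::
                    pvLoopA (pvCollect (pvHeader (c :: rest)).1.toNat (pvHeader (c :: rest)).2).2 by
                  rw [pvLoopA]; simp [h0]]
            rw [header_token c rest, pvWalk]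
            obtain ⟨hs, hd⟩ :=
              collect_tokens (pvHeader (c :: rest)).1.toNat (pvHeader (c :: rest)).2
            have hq : (pvCollect (pvHeader (c :: rest)).1.toNat (pvHeader (c :: rest)).2).2.length ≤ n := by
              have h1 := pvHeader_lt c rest
              have h2 := pvCollect_len (pvHeader (c :: rest)).1.toNat (pvHeader (c :: rest)).2
              simp only [List.length_cons] at h1 h
              omega
            simp only [take_min_len, drop_min_len, hs, ← hd, ih _ hq]

theorem loopA_eq_walk_tokenize (l : List Char) : pvLoopA l = pvWalk (pvTokenize l) :=
  loopA_eq_walk_tokenize_aux l.length l (Nat.le_refl _)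

-- ===== VERDICT (by name: the statement is the Claim_ definition above) =====
theorem string_to_number_list_spec : Claim_equal_string_to_number_list := by
  intro s _
  unfold Spec_string_to_number_list string_to_number_list string_to_number_list_alt
  exact loopA_eq_walk_tokenize _
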